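-- pv_equiv track=rewrite | github.com/asdfang/constraint-transformer-bach | Grader/find_repeated_sequences.py | pop_subsequences
-- ===== SOURCE A (Python) =====
-- def pop_subsequences(candidate_set):
--     """
--     remove redundant subsequences from the candidate set (python Dictionary)
--     candidate_set has value as sequence, key as rep_count
--
--     e.g. candidate_set = {('A4', '__', 'G4', '__'): 4, ('B5','G4'): 6, ('B5','G4','F4'): 6} – it will remove ('B5','G4')
--     """
--     ckeys = sorted(candidate_set.keys(), key=len)[::-1]
--     last = len(ckeys)
--     i = 0
--
--     while i < last:
--         j = i+1
--         while j < last: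
--             seq1 = ckeys[i]
--             seq2 = ckeys[j]
--             if len(seq2) < len(seq1) and is_subset(seq1, seq2) and candidate_set[seq1] == candidate_set[seq2]:
--                 candidate_set.pop(seq2)
--                 del ckeys[j]
--                 last -= 1
--             else:
--                 j += 1
--         i += 1
--
--     return candidate_set
--
-- def is_subset(seq1, seq2):
--     """
--     Arguments
--         seq1, seq2: a sequence (tuple) of notes
--
--     check if seq2 is a strict subsequence of seq1
--     """
--     s1 = list(seq1)
--     s2 = list(seq2)
--     assert len(s2) < len(s1)
--     ln = len(seq2)
--     return any((all(s2[j] == s1[i + j] for j in range(ln)) for i in range(len(s1) - ln + 1)))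
-- ===== SOURCE B (Python) =====
-- def pop_subsequences(candidate_set):
--     """Same result as A: drop every key that is a strict contiguous subsequence
--     of a longer key with the same count.  Mutates candidate_set in place and
--     returns it, like A.  No sorting, no index-juggling nested while loops:
--     group keys by count, mark dominated keys declaratively, pop them."""
--     by_count = {}
--     for k, v in candidate_set.items():
--         by_count.setdefault(v, []).append(k)
--     doomed = set()
--     for group in by_count.values():
--         for k in group:
--             if any(len(big) > len(k) and contains(big, k) for big in group):
--                 doomed.add(k)
--     for k in list(candidate_set):
--         if k in doomed:
--             candidate_set.pop(k)
--     return candidate_set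
--
--
-- def contains(big, small):
--     m = len(small)
--     return any(small == tuple(big[i:i + m]) for i in range(len(big) - m + 1))
-- ===== Notes on version B (the rewrite author's own statement) =====
-- stated objective: alternative
-- what changed: Replaces A's sort-by-length plus nested index-mutating while loops that delete from the key list and dict mid-scan with a declarative pass: group keys by their count, mark every key that is a strict contiguous subsequence of a longer key in its group, then pop the marked keys; correctness rests on transitivity of contiguous containment, which makes the removed set order-independent.
import Mathlib
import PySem

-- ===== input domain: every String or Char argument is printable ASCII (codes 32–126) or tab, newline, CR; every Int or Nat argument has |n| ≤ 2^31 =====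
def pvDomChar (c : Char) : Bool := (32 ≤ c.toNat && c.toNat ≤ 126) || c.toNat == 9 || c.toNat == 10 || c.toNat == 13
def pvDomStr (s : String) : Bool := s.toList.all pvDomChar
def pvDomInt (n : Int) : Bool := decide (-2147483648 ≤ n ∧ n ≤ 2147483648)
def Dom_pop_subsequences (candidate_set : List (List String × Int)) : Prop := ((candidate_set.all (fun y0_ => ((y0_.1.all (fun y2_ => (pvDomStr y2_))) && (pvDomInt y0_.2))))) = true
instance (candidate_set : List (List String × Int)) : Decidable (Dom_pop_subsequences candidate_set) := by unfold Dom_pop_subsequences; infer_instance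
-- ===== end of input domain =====

-- B drops A's sort-by-length and nested index-mutating while loops: it groups
-- keys by count, marks keys that are strict contiguous subsequences of a longer
-- key in their group, and pops the marked keys (alternative algorithm, same
-- complexity class).  Both Pythons mutate the dict argument in place in the
-- same way; the equivalence proved here is about the returned value.

-- ===== PORT A =====

-- is_subset(seq1, seq2): seq2 occurs as a contiguous block inside seq1.
-- The Python 'assert len(s2) < len(s1)' holds at every call site (the caller
-- tests the lengths first), so it never fires and is omitted.  The indexing
-- s2[j] / s1[i + j] is always in range, so pyGetD is exact here.
def is_subset (seq1 seq2 : List String) : Bool :=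
  let s1 := seq1
  let s2 := seq2
  let ln := seq2.length
  (PySem.List.pyRange 0 ((s1.length : Int) - (ln : Int) + 1) 1).any fun i =>
    (PySem.List.pyRange 0 ((ln : Int)) 1).all fun j =>
      PySem.List.pyGetD s2 j "" == PySem.List.pyGetD s1 (i + j) ""

-- A's inner 'while j < last' loop; (d, ckeys) is the mutable state and 'last'
-- is always ckeys.length.  ckeys[i] and ckeys[j] are in range at every call
-- (i < j < ckeys.length), so List.getD is exact; candidate_set[seq1] and
-- candidate_set[seq2] are present keys, so comparing the two Dict.get?
-- options is exact as well.  'fuel' only makes the recursion structural: the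
-- loop runs at most ckeys.length - j times (each step does j+1 or shrinks the
-- list), and every caller passes at least that much, so the value is the same.
def popLoopJ (fuel : Nat) (d : PySem.Dict (List String) Int)
    (ckeys : List (List String)) (i j : Nat) :
    PySem.Dict (List String) Int × List (List String) :=
  match fuel with
  | 0 => (d, ckeys)
  | fuel + 1 =>
    if j < ckeys.length then
      let seq1 := ckeys.getD i []
      let seq2 := ckeys.getD j []
      if seq2.length < seq1.length && is_subset seq1 seq2
          && (d.get? seq1 == d.get? seq2) then
        popLoopJ fuel (d.erase seq2) (ckeys.eraseIdx j) i j
      else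
        popLoopJ fuel d ckeys i (j + 1)
    else
      (d, ckeys)

-- A's outer 'while i < last' loop (same fuel discipline: at most
-- ckeys.length - i iterations).
def popLoopI (fuel : Nat) (d : PySem.Dict (List String) Int)
    (ckeys : List (List String)) (i : Nat) : PySem.Dict (List String) Int :=
  match fuel with
  | 0 => d
  | fuel + 1 =>
    if i < ckeys.length then
      let r := popLoopJ ckeys.length d ckeys i (i + 1)
      popLoopI fuel r.1 r.2 (i + 1)
    else
      d

def pop_subsequences (candidate_set : List (List String × Int)) :
    List (List String × Int) :=
  let d := PySem.Dict.mk candidate_set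
  -- sorted(candidate_set.keys(), key=len)[::-1]: a full reverse slice is
  -- List.reverse (exact)
  let ckeys := (PySem.List.sorted d.keys (fun k => k.length) false).reverse
  (popLoopI ckeys.length d ckeys 0).items

-- ===== PORT B =====

-- contains(big, small): some slice big[i:i+m] equals small.
def containsSeq (big small : List String) : Bool :=
  let m := small.length
  (PySem.List.pyRange 0 ((big.length : Int) - (m : Int) + 1) 1).any fun i =>
    small == PySem.List.slice big (some i) (some (i + (m : Int)))

def pop_subsequences_alt (candidate_set : List (List String × Int)) :
    List (List String × Int) :=
  let d := PySem.Dict.mk candidate_set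
  -- by_count.setdefault(v, []).append(k)  ==  d[v] = d.get(v, []) + [k]
  let byCount : PySem.Dict Int (List (List String)) :=
    d.items.foldl (fun bc kv => bc.modify kv.2 [] (fun g => g ++ [kv.1]))
      PySem.Dict.empty
  let doomed : PySem.Set (List String) :=
    byCount.values.foldl (fun dm group =>
      group.foldl (fun dm k =>
        if group.any (fun big => decide (k.length < big.length) && containsSeq big k)
        then PySem.Set.add dm k else dm) dm)
      PySem.Set.empty
  let d' := d.keys.foldl (fun acc k =>
      if PySem.Set.contains doomed k then acc.erase k else acc) d
  d'.items

-- ===== PRECONDITION & SPEC =====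
-- Pre_ excludes association lists with duplicate keys: they are not a faithful
-- encoding of the Python dict argument (dict construction collapses duplicates
-- before pop_subsequences ever runs), so the corner is an artefact of the
-- encoding, not of A.
def Pre_pop_subsequences (candidate_set : List (List String × Int)) : Prop :=
  (candidate_set.map Prod.fst).Nodup
instance (candidate_set : List (List String × Int)) : Decidable (Pre_pop_subsequences candidate_set) := by unfold Pre_pop_subsequences; infer_instance

def pvWitness_pop_subsequences : (List (List String × Int)) :=
  [(["B5", "G4"], 6), (["B5", "G4", "F4"], 6), (["A4", "C4"], 4)]

def Spec_pop_subsequences (candidate_set : List (List String × Int)) (out : List (List String × Int)) : Prop := out = pop_subsequences_alt candidate_set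
instance (candidate_set : List (List String × Int)) (out : List (List String × Int)) : Decidable (Spec_pop_subsequences candidate_set out) := by unfold Spec_pop_subsequences; infer_instance

-- ===== CLAIM (what is proved, stated in full; the proofs are below) =====
def Claim_equal_pop_subsequences : Prop := ∀ (candidate_set : List (List String × Int)), Dom_pop_subsequences candidate_set → Pre_pop_subsequences candidate_set → Spec_pop_subsequences candidate_set (pop_subsequences candidate_set)

-- ===== LEMMAS AND PROOFS =====

theorem infix_of_drop_take (s1 s2 : List String) (n : Nat)
    (h : s2 = (s1.drop n).take s2.length) : s2 <:+: s1 := by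
  rw [h]; exact (((s1.drop n).take_prefix s2.length).isInfix).trans (s1.drop_suffix n).isInfix

theorem infix_drop_take (s1 s2 : List String) (h : s2 <:+: s1) :
    ∃ n : Nat, n + s2.length ≤ s1.length ∧ s2 = (s1.drop n).take s2.length := by
  obtain ⟨s, t, rfl⟩ := h
  refine ⟨s.length, by simp, ?_⟩
  rw [List.append_assoc, List.drop_left, List.take_left]

theorem block_eq_iff (s1 s2 : List String) (n : Nat) (h : n + s2.length ≤ s1.length) :
    (∀ m : Nat, m < s2.length → s2.getD m "" = s1.getD (n + m) "") ↔
      s2 = (s1.drop n).take s2.length := by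
  constructor
  · intro hp
    apply List.ext_getElem
    · simp; omega
    · intro j h1 h2
      have hj : j < s2.length := h1
      have := hp j hj
      rw [List.getD_eq_getElem s2 "" hj, List.getD_eq_getElem s1 "" (by omega)] at this
      simp only [List.getElem_take, List.getElem_drop]
      exact this
  · intro heq m hm
    rw [List.getD_eq_getElem s2 "" hm, List.getD_eq_getElem s1 "" (by omega)]
    have h2 : s2[m] = ((s1.drop n).take s2.length)[m]'(by simp; omega) := by
      congr 1
    rw [h2]
    simp [List.getElem_take, List.getElem_drop]

theorem is_subset_iff_infix (s1 s2 : List String) :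
    is_subset s1 s2 = true ↔ s2 <:+: s1 := by
  unfold is_subset
  simp only [List.any_eq_true, List.all_eq_true]
  constructor
  · rintro ⟨i, hi, hall⟩
    rw [PySem.List.mem_pyRange_one] at hi
    obtain ⟨hi0, hilt⟩ := hi
    set n := i.toNat with hn
    have hni : (n : Int) = i := Int.toNat_of_nonneg hi0
    have hle : n + s2.length ≤ s1.length := by omega
    refine infix_of_drop_take s1 s2 n ((block_eq_iff s1 s2 n hle).mp ?_)
    intro m hm
    have hmem : ((m : Nat) : Int) ∈ PySem.List.pyRange 0 (s2.length : Int) 1 := by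
      rw [PySem.List.mem_pyRange_one]; omega
    have := hall _ hmem
    rw [show i + ((m : Nat) : Int) = ((n + m : Nat) : Int) by omega] at this
    rw [PySem.List.pyGetD_natCast, PySem.List.pyGetD_natCast] at this
    exact beq_iff_eq.mp this
  · intro h
    obtain ⟨n, hle, heq⟩ := infix_drop_take s1 s2 h
    refine ⟨(n : Int), ?_, ?_⟩
    · rw [PySem.List.mem_pyRange_one]; omega
    · intro j hj
      rw [PySem.List.mem_pyRange_one] at hj
      obtain ⟨hj0, hjlt⟩ := hj
      have hjm : ((j.toNat : Nat) : Int) = j := Int.toNat_of_nonneg hj0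
      rw [show j = ((j.toNat : Nat) : Int) by omega,
        show (n : Int) + ((j.toNat : Nat) : Int) = ((n + j.toNat : Nat) : Int) by omega]
      rw [PySem.List.pyGetD_natCast, PySem.List.pyGetD_natCast]
      exact beq_iff_eq.mpr ((block_eq_iff s1 s2 n hle).mpr heq j.toNat (by omega))

theorem containsSeq_iff_infix (big small : List String) :
    containsSeq big small = true ↔ small <:+: big := by
  unfold containsSeq
  simp only [List.any_eq_true]
  constructor
  · rintro ⟨i, hi, hbeq⟩
    rw [PySem.List.mem_pyRange_one] at hi
    obtain ⟨hi0, hilt⟩ := hi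
    have hni : ((i.toNat : Nat) : Int) = i := Int.toNat_of_nonneg hi0
    rw [show i = ((i.toNat : Nat) : Int) by omega] at hbeq
    rw [PySem.List.slice_natCast_add] at hbeq
    exact infix_of_drop_take big small i.toNat (beq_iff_eq.mp hbeq)
  · intro h
    obtain ⟨n, hle, heq⟩ := infix_drop_take big small h
    refine ⟨(n : Int), ?_, ?_⟩
    · rw [PySem.List.mem_pyRange_one]; omega
    · rw [PySem.List.slice_natCast_add]
      exact beq_iff_eq.mpr heq

-- b dominates y: y is strictly shorter, a contiguous block of b, same count.
def domPair (cs : List (List String × Int)) (b y : List String) : Bool :=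
  decide (y.length < b.length) && is_subset b y &&
    ((PySem.Dict.mk cs).get? b == (PySem.Dict.mk cs).get? y)

def dominatedB (cs : List (List String × Int)) (y : List String) : Bool :=
  (cs.map Prod.fst).any fun b => domPair cs b y

theorem domPair_trans (cs : List (List String × Int)) {a b c : List String}
    (h1 : domPair cs a b = true) (h2 : domPair cs b c = true) :
    domPair cs a c = true := by
  simp only [domPair, Bool.and_eq_true, decide_eq_true_eq, beq_iff_eq,
    is_subset_iff_infix] at h1 h2 ⊢
  exact ⟨⟨lt_trans h2.1.1 h1.1.1, h2.1.2.trans h1.1.2⟩, h1.2.trans h2.2⟩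

theorem get?_eq_of_items_filter (cs : List (List String × Int))
    (hnd : (cs.map Prod.fst).Nodup) (d : PySem.Dict (List String) Int)
    (ck : List (List String))
    (hd : d.items = cs.filter fun kv => decide (kv.1 ∈ ck)) (x : List String)
    (hx : x ∈ ck) (hxk : x ∈ cs.map Prod.fst) :
    d.get? x = (PySem.Dict.mk cs).get? x := by
  obtain ⟨kv, hkv, hfst⟩ := List.mem_map.mp hxk
  have hdk : d.keys.Nodup := by
    have hsub : List.Sublist d.items cs := by rw [hd]; exact List.filter_sublist
    exact hnd.sublist (hsub.map Prod.fst)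
  have hmem : (x, kv.2) ∈ d.items := by
    rw [hd]
    exact List.mem_filter.mpr ⟨by rw [← hfst]; exact hkv, by simp [hx]⟩
  have h1 : d.get? x = some kv.2 := PySem.Dict.get?_of_mem_items d hmem hdk
  have hmk : (x, kv.2) ∈ (PySem.Dict.mk cs).items := by
    show (x, kv.2) ∈ cs
    rw [← hfst]; exact hkv
  have hmknd : (PySem.Dict.mk cs).keys.Nodup := hnd
  rw [h1, PySem.Dict.get?_of_mem_items (PySem.Dict.mk cs) hmk hmknd]

theorem mem_eraseIdx_nodup {α : Type} [DecidableEq α] (l : List α) (hnd : l.Nodup)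
    (j : Nat) (hj : j < l.length) (x : α) :
    x ∈ l.eraseIdx j ↔ x ∈ l ∧ x ≠ l[j] := by
  rw [List.eraseIdx_eq_take_drop_succ]
  have hsplit : l.take j ++ l.drop j = l := List.take_append_drop j l
  have hdropc : l.drop j = l[j] :: l.drop (j + 1) := List.drop_eq_getElem_cons hj
  have hnd2 : (l.take j ++ l[j] :: l.drop (j + 1)).Nodup := by
    rw [← hdropc, hsplit]; exact hnd
  rw [List.nodup_append] at hnd2
  obtain ⟨hnd3, hnd4, hdisj⟩ := hnd2
  rw [List.nodup_cons] at hnd4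
  constructor
  · rintro hx
    rcases List.mem_append.mp hx with h | h
    · refine ⟨by rw [← hsplit]; exact List.mem_append.mpr (Or.inl h), ?_⟩
      intro hxe; subst hxe
      exact hdisj _ h _ List.mem_cons_self rfl
    · refine ⟨by rw [← hsplit, hdropc]; exact List.mem_append.mpr (Or.inr (List.mem_cons_of_mem _ h)), ?_⟩
      intro hxe; subst hxe
      exact hnd4.1 h
  · rintro ⟨hx, hne⟩
    rw [← hsplit, hdropc] at hx
    rcases List.mem_append.mp hx with h | h
    · exact List.mem_append.mpr (Or.inl h)
    · rcases List.mem_cons.mp h with h | h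
      · exact absurd h hne
      · exact List.mem_append.mpr (Or.inr h)

theorem popLoopJ_length_le (fuel : Nat) (d : PySem.Dict (List String) Int)
    (ckeys : List (List String)) (i j : Nat) :
    (popLoopJ fuel d ckeys i j).2.length ≤ ckeys.length := by
  induction fuel generalizing d ckeys j with
  | zero => exact le_refl _
  | succ fuel ih =>
    simp only [popLoopJ]
    by_cases hj : j < ckeys.length
    · rw [if_pos hj]
      by_cases hc : (decide ((ckeys.getD j []).length < (ckeys.getD i []).length)
          && is_subset (ckeys.getD i []) (ckeys.getD j [])
          && (d.get? (ckeys.getD i []) == d.get? (ckeys.getD j []))) = true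
      · rw [if_pos hc]
        have h1 := ih (d.erase (ckeys.getD j [])) (ckeys.eraseIdx j) j
        have h2 := List.length_eraseIdx_of_lt (l := ckeys) (i := j) hj
        omega
      · rw [if_neg hc]
        exact ih d ckeys (j + 1)
    · rw [if_neg hj]

theorem popLoopJ_spec (cs : List (List String × Int))
    (hnd : (cs.map Prod.fst).Nodup) (i : Nat) :
    ∀ (fuel : Nat) (d : PySem.Dict (List String) Int)
    (ck : List (List String)) (j : Nat),
    ck.Nodup → (∀ x ∈ ck, x ∈ cs.map Prod.fst) →
    (d.items = cs.filter fun kv => decide (kv.1 ∈ ck)) → i < j →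
    ck.length ≤ fuel + j →
    (popLoopJ fuel d ck i j).2
        = ck.take j ++ (ck.drop j).filter (fun y => !domPair cs (ck.getD i []) y)
      ∧ (popLoopJ fuel d ck i j).1.items
        = cs.filter (fun kv => decide (kv.1 ∈ (popLoopJ fuel d ck i j).2)) := by
  intro fuel
  induction fuel with
  | zero =>
    intro d ck j hnd2 hsub hd hij hfuel
    have hlen : ck.length ≤ j := by omega
    refine ⟨?_, hd⟩
    show ck = _
    rw [List.take_of_length_le hlen, List.drop_of_length_le hlen]
    simp
  | succ fuel ih =>
    intro d ck j hnd2 hsub hd hij hfuel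
    by_cases hj : j < ck.length
    · simp only [popLoopJ]
      rw [if_pos hj]
      have hiLt : i < ck.length := lt_trans hij hj
      have hgi : ck.getD i [] = ck[i] := List.getD_eq_getElem ck [] hiLt
      have hgj : ck.getD j [] = ck[j] := List.getD_eq_getElem ck [] hj
      have hseq1mem : ck.getD i [] ∈ ck := by rw [hgi]; exact List.getElem_mem hiLt
      have hseq2mem : ck.getD j [] ∈ ck := by rw [hgj]; exact List.getElem_mem hj
      have hget1 := get?_eq_of_items_filter cs hnd d ck hd _ hseq1mem (hsub _ hseq1mem)
      have hget2 := get?_eq_of_items_filter cs hnd d ck hd _ hseq2mem (hsub _ hseq2mem)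
      by_cases hcond : (decide ((ck.getD j []).length < (ck.getD i []).length)
          && is_subset (ck.getD i []) (ck.getD j [])
          && (d.get? (ck.getD i []) == d.get? (ck.getD j []))) = true
      · rw [if_pos hcond]
        have hdp : domPair cs (ck.getD i []) (ck.getD j []) = true := by
          simp only [domPair]; rw [← hget1, ← hget2]; exact hcond
        have hnd3 : (ck.eraseIdx j).Nodup := hnd2.sublist (List.eraseIdx_sublist ck j)
        have hsub3 : ∀ x ∈ ck.eraseIdx j, x ∈ cs.map Prod.fst := fun x hx =>
          hsub x ((List.eraseIdx_sublist ck j).subset hx)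
        have hd3 : (d.erase (ck.getD j [])).items
            = cs.filter fun kv => decide (kv.1 ∈ ck.eraseIdx j) := by
          show (d.items.filter fun p => !(p.1 == ck.getD j [])) = _
          rw [hd, List.filter_filter]
          apply List.filter_congr
          intro kv _
          by_cases h1 : kv.1 ∈ ck <;> by_cases h2 : kv.1 = ck[j] <;>
            simp [h1, h2, mem_eraseIdx_nodup ck hnd2 j hj, hgj, List.getD_eq_getElem?_getD, List.getElem?_eq_getElem, hj]
        obtain ⟨ihA, ihB⟩ := ih (d.erase (ck.getD j [])) (ck.eraseIdx j) j hnd3 hsub3 hd3 hij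
          (by have := List.length_eraseIdx_of_lt (l := ck) (i := j) hj; omega)
        refine ⟨?_, ihB⟩
        rw [ihA]
        have htake : (ck.eraseIdx j).take j = ck.take j := by
          rw [List.eraseIdx_eq_take_drop_succ]
          exact List.take_left' (by simp [List.length_take]; omega)
        have hdrop : (ck.eraseIdx j).drop j = ck.drop (j + 1) := by
          rw [List.eraseIdx_eq_take_drop_succ]
          exact List.drop_left' (by simp [List.length_take]; omega)
        have hgi' : (ck.eraseIdx j).getD i [] = ck.getD i [] := by
          rw [List.eraseIdx_eq_take_drop_succ]
          rw [List.getD_eq_getElem _ [] (by simp [List.length_take]; omega), hgi]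
          rw [List.getElem_append_left (by simp [List.length_take]; omega)]
          simp [List.getElem_take]
        rw [htake, hdrop, hgi']
        rw [List.drop_eq_getElem_cons hj,
          List.filter_cons_of_neg (by rw [← hgj, hdp]; simp)]
      · rw [if_neg hcond]
        have hdp : domPair cs (ck.getD i []) (ck.getD j []) = false := by
          have heq : domPair cs (ck.getD i []) (ck.getD j [])
              = (decide ((ck.getD j []).length < (ck.getD i []).length)
                  && is_subset (ck.getD i []) (ck.getD j [])
                  && (d.get? (ck.getD i []) == d.get? (ck.getD j []))) := by
            simp only [domPair]; rw [hget1, hget2]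
          rw [heq]
          exact Bool.eq_false_iff.mpr hcond
        obtain ⟨ihA, ihB⟩ := ih d ck (j + 1) hnd2 hsub hd
          (lt_trans hij (Nat.lt_succ_self j)) (by omega)
        refine ⟨?_, ihB⟩
        rw [ihA]
        rw [List.take_succ_eq_append_getElem hj]
        conv_rhs => rw [List.drop_eq_getElem_cons hj]
        rw [List.filter_cons_of_pos (by rw [← hgj, hdp]; rfl)]
        rw [List.append_assoc, List.singleton_append]
    · simp only [popLoopJ]
      rw [if_neg hj]
      have hlen : ck.length ≤ j := Nat.le_of_not_lt hj
      refine ⟨?_, hd⟩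
      show ck = _
      rw [List.take_of_length_le hlen, List.drop_of_length_le hlen]
      simp

-- the state after the outer loop has swept every index: exactly the
-- non-dominated entries survive
theorem popLoopFinal_eq (cs : List (List String × Int))
    (d : PySem.Dict (List String) Int)
    (ck : List (List String)) :
    ck.Nodup →
    ck.Pairwise (fun a b => b.length ≤ a.length) →
    (d.items = cs.filter fun kv => decide (kv.1 ∈ ck)) →
    (∀ a : Nat, ∀ (ha : a < ck.length), ∀ y ∈ ck.drop (a + 1),
      domPair cs ck[a] y = false) →
    (∀ x ∈ cs.map Prod.fst, x ∉ ck → dominatedB cs x = true) →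
    d.items = cs.filter fun kv => !dominatedB cs kv.1 := by
  intro hnd2 hpair hd hP hR
  rw [hd]
  apply List.filter_congr
  intro kv hkv
  have hkvk : kv.1 ∈ cs.map Prod.fst := List.mem_map.mpr ⟨kv, hkv, rfl⟩
  by_cases hmem : kv.1 ∈ ck
  · suffices hdom : dominatedB cs kv.1 = false by simp [hmem, hdom]
    by_contra hcon
    have hdom : dominatedB cs kv.1 = true := by
      revert hcon; cases dominatedB cs kv.1 <;> simp
    obtain ⟨b0, hb0, hb0p⟩ := List.any_eq_true.mp hdom
    -- pick a dominator of kv.1 of maximal length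
    set lst := (cs.map Prod.fst).filter (fun b => domPair cs b kv.1) with hlst
    have hne : lst ≠ [] := by
      intro hnil
      have : b0 ∈ lst := List.mem_filter.mpr ⟨hb0, hb0p⟩
      rw [hnil] at this
      exact absurd this (List.not_mem_nil)
    obtain ⟨bm, hbm, hbmax⟩ : ∃ a ∈ lst, ∀ b ∈ lst, b.length ≤ a.length := by
      cases hm : lst.argmax List.length with
      | none => exact absurd (List.argmax_eq_none.mp hm) hne
      | some m => exact ⟨m, List.argmax_mem hm, fun b hb => List.le_of_mem_argmax hb hm⟩
    have hbmk : bm ∈ cs.map Prod.fst := (List.mem_filter.mp hbm).1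
    have hbmp : domPair cs bm kv.1 = true := by
      have := (List.mem_filter.mp hbm).2
      simpa using this
    have hbmundom : dominatedB cs bm = false := by
      by_contra hcon2
      have : dominatedB cs bm = true := by revert hcon2; cases dominatedB cs bm <;> simp
      obtain ⟨c, hc, hcp⟩ := List.any_eq_true.mp this
      have hc1 : domPair cs c kv.1 = true := domPair_trans cs hcp hbmp
      have hc2 : c ∈ lst := List.mem_filter.mpr ⟨hc, by simpa using hc1⟩
      have hc3 : c.length ≤ bm.length := hbmax c hc2
      have hc4 : bm.length < c.length := by
        have := hcp
        simp only [domPair, Bool.and_eq_true, decide_eq_true_eq] at this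
        exact this.1.1
      omega
    have hbmck : bm ∈ ck := by
      by_contra hno
      rw [hR bm hbmk hno] at hbmundom
      exact absurd hbmundom (by simp)
    -- indices
    obtain ⟨ib, hib, hibe⟩ := List.mem_iff_getElem.mp hbmck
    obtain ⟨ix, hix, hixe⟩ := List.mem_iff_getElem.mp hmem
    have hlt : kv.1.length < bm.length := by
      have := hbmp
      simp only [domPair, Bool.and_eq_true, decide_eq_true_eq] at this
      exact this.1.1
    have hlens : ∀ p q (hp : p < ck.length) (hq : q < ck.length), p < q →
        ck[q].length ≤ ck[p].length := by
      intro p q hp hq hpq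
      exact (List.pairwise_iff_getElem.mp hpair) p q hp hq hpq
    have hord : ib < ix := by
      rcases Nat.lt_trichotomy ib ix with h | h | h
      · exact h
      · exfalso
        subst h
        have heq : bm = kv.1 := by rw [← hibe]; exact hixe
        rw [heq] at hlt
        omega
      · exfalso
        have := hlens ix ib hix hib h
        rw [hibe, hixe] at this
        omega
    have hmemdrop : kv.1 ∈ ck.drop (ib + 1) := by
      apply List.mem_iff_getElem?.mpr
      refine ⟨ix - ib - 1, ?_⟩
      rw [List.getElem?_drop]
      rw [show ib + 1 + (ix - ib - 1) = ix by omega]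
      rw [List.getElem?_eq_getElem hix, hixe]
    have := hP ib hib kv.1 hmemdrop
    rw [hibe] at this
    rw [this] at hbmp
    exact absurd hbmp (by simp)
  · have := hR kv.1 hkvk hmem
    simp [hmem, this]

theorem popLoopI_spec (cs : List (List String × Int))
    (hnd : (cs.map Prod.fst).Nodup) :
    ∀ (fuel : Nat) (d : PySem.Dict (List String) Int)
    (ck : List (List String)) (i : Nat),
    ck.Nodup → (∀ x ∈ ck, x ∈ cs.map Prod.fst) →
    ck.Pairwise (fun a b => b.length ≤ a.length) →
    (d.items = cs.filter fun kv => decide (kv.1 ∈ ck)) →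
    (∀ a : Nat, a < i → ∀ (ha : a < ck.length), ∀ y ∈ ck.drop (a + 1),
      domPair cs ck[a] y = false) →
    (∀ x ∈ cs.map Prod.fst, x ∉ ck → dominatedB cs x = true) →
    ck.length ≤ fuel + i →
    (popLoopI fuel d ck i).items = cs.filter fun kv => !dominatedB cs kv.1 := by
  intro fuel
  induction fuel with
  | zero =>
    intro d ck i hnd2 hsub hpair hd hP hR hfuel
    exact popLoopFinal_eq cs d ck hnd2 hpair hd
      (fun a ha => hP a (by omega) ha) hR
  | succ fuel ih =>
    intro d ck i hnd2 hsub hpair hd hP hR hfuel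
    by_cases hi : i < ck.length
    · simp only [popLoopI]
      rw [if_pos hi]
      have hgi : ck.getD i [] = ck[i] := List.getD_eq_getElem ck [] hi
      obtain ⟨ckA, ckB⟩ := popLoopJ_spec cs hnd i ck.length d ck (i + 1)
        hnd2 hsub hd (Nat.lt_succ_self i) (by omega)
      set r := popLoopJ ck.length d ck i (i + 1) with hr
      have hsl : List.Sublist r.2 ck := by
        rw [ckA]
        calc List.Sublist (ck.take (i+1) ++ (ck.drop (i+1)).filter
                (fun y => !domPair cs (ck.getD i []) y)) (ck.take (i+1) ++ ck.drop (i+1)) :=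
              List.Sublist.append_left List.filter_sublist _
          _ = ck := List.take_append_drop _ _
      apply ih
      · exact hnd2.sublist hsl
      · exact fun x hx => hsub x (hsl.subset hx)
      · exact hpair.sublist hsl
      · exact ckB
      · -- the processed-prefix invariant at i + 1
        intro a ha1 ha2 y hy
        have hlen_take : (ck.take (i+1)).length = i + 1 := by
          simp [List.length_take]; omega
        have ha2' : a < (ck.take (i+1) ++ (ck.drop (i+1)).filter
            (fun y => !domPair cs (ck.getD i []) y)).length := by
          rw [← ckA]; exact ha2
        have hra : r.2[a] = ck[a]'(by omega) := by
          rw [List.getElem_of_eq ckA]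
          rw [List.getElem_append_left (by rw [List.length_take]; omega)]
          simp [List.getElem_take]
        have hy' : y ∈ (ck.take (i+1)).drop (a+1) ++
            (ck.drop (i+1)).filter (fun y => !domPair cs (ck.getD i []) y) := by
          rw [ckA] at hy
          rwa [List.drop_append_of_le_length (by omega)] at hy
        rcases Nat.lt_or_ge a i with hai | hai
        · -- a < i: use the old invariant
          have hmem : y ∈ ck.drop (a+1) := by
            rcases List.mem_append.mp hy' with h | h
            · rw [List.drop_take] at h
              exact (List.take_sublist _ _).subset h
            · have h2 : y ∈ ck.drop (i+1) := List.filter_sublist.subset h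
              have h3 : ck.drop (i+1) = (ck.drop (a+1)).drop (i-a) := by
                rw [List.drop_drop]
                congr 1
                omega
              rw [h3] at h2
              exact (List.drop_sublist _ _).subset h2
          rw [hra]
          exact hP a hai (by omega) y hmem
        · -- a = i
          have hae : a = i := by omega
          subst hae
          rw [hra]
          rcases List.mem_append.mp hy' with h | h
          · rw [List.drop_take] at h
            simp at h
          · have := List.of_mem_filter h
            rw [hgi] at this
            simpa using this
      · -- removal soundness
        intro x hxk hxr
        by_cases hxc : x ∈ ck
        · have hxsplit : x ∈ ck.take (i+1) ++ ck.drop (i+1) := by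
            rw [List.take_append_drop]; exact hxc
          rcases List.mem_append.mp hxsplit with h | h
          · exact absurd (by rw [ckA]; exact List.mem_append_left _ h) hxr
          · by_cases hp : domPair cs (ck.getD i []) x = true
            · apply List.any_eq_true.mpr
              refine ⟨ck.getD i [], ?_, hp⟩
              rw [hgi]
              exact hsub _ (List.getElem_mem hi)
            · exfalso
              apply hxr
              rw [ckA]
              apply List.mem_append_right
              apply List.mem_filter.mpr
              exact ⟨h, by
                simp only [Bool.not_eq_true']
                exact Bool.eq_false_iff.mpr hp⟩
        · exact hR x hxk hxc
      · have hlen := popLoopJ_length_le ck.length d ck i (i + 1)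
        rw [← hr] at hlen
        omega
    · simp only [popLoopI]
      rw [if_neg hi]
      exact popLoopFinal_eq cs d ck hnd2 hpair hd
        (fun a ha => hP a (by omega) ha) hR

theorem popA_eq (cs : List (List String × Int)) (hnd : (cs.map Prod.fst).Nodup) :
    pop_subsequences cs = cs.filter (fun kv => !dominatedB cs kv.1) := by
  unfold pop_subsequences
  have hkeys : (PySem.Dict.mk cs).keys = cs.map Prod.fst := rfl
  set ck0 := (PySem.List.sorted (PySem.Dict.mk cs).keys (fun k => k.length) false).reverse
    with hck0
  have hperm : ck0.Perm (cs.map Prod.fst) := by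
    rw [hck0, ← hkeys]
    exact (List.reverse_perm _).trans (PySem.List.sorted_perm _ _ _)
  apply popLoopI_spec cs hnd
  · exact hperm.nodup_iff.mpr hnd
  · exact fun x hx => hperm.subset hx
  · rw [List.pairwise_reverse]
    exact PySem.List.sorted_pairwise _ _
  · symm
    apply List.filter_eq_self.mpr
    intro kv hkv
    simp only [decide_eq_true_eq]
    exact hperm.mem_iff.mpr (List.mem_map.mpr ⟨kv, hkv, rfl⟩)
  · intro a ha
    omega
  · intro x hx hnx
    exact absurd (hperm.mem_iff.mpr hx) hnx
  · omega

theorem mem_foldl_add_if (p : List String → Bool) (l : List (List String)) :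
    ∀ (s0 : PySem.Set (List String)) (x : List String),
    (x ∈ l.foldl (fun s k => if p k then PySem.Set.add s k else s) s0) ↔
      x ∈ s0 ∨ (x ∈ l ∧ p x = true) := by
  induction l with
  | nil => intro s0 x; simp
  | cons a t ih =>
    intro s0 x
    simp only [List.foldl_cons]
    by_cases hpa : p a = true
    · rw [if_pos hpa, ih]
      rw [PySem.Set.mem_add]
      constructor
      · rintro ((h | h) | h)
        · exact Or.inl h
        · exact Or.inr ⟨by rw [h]; exact List.mem_cons_self, by rw [h]; exact hpa⟩
        · exact Or.inr ⟨List.mem_cons_of_mem _ h.1, h.2⟩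
      · rintro (h | ⟨h1, h2⟩)
        · exact Or.inl (Or.inl h)
        · rcases List.mem_cons.mp h1 with h | h
          · exact Or.inl (Or.inr h)
          · exact Or.inr ⟨h, h2⟩
    · rw [if_neg hpa, ih]
      constructor
      · rintro (h | h)
        · exact Or.inl h
        · exact Or.inr ⟨List.mem_cons_of_mem _ h.1, h.2⟩
      · rintro (h | ⟨h1, h2⟩)
        · exact Or.inl h
        · rcases List.mem_cons.mp h1 with h | h
          · exact absurd (by rw [← h]; exact h2) hpa
          · exact Or.inr ⟨h, h2⟩

theorem mem_doomed_loop (q : List (List String) → List String → Bool)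
    (gs : List (List (List String))) :
    ∀ (s0 : PySem.Set (List String)) (x : List String),
    (x ∈ gs.foldl (fun dm g =>
        g.foldl (fun dm k => if q g k then PySem.Set.add dm k else dm) dm) s0) ↔
      x ∈ s0 ∨ ∃ g ∈ gs, x ∈ g ∧ q g x = true := by
  induction gs with
  | nil => intro s0 x; simp
  | cons g t ih =>
    intro s0 x
    simp only [List.foldl_cons]
    rw [ih, mem_foldl_add_if]
    constructor
    · rintro ((h | h) | ⟨g', hg', h⟩)
      · exact Or.inl h
      · exact Or.inr ⟨g, List.mem_cons_self, h⟩
      · exact Or.inr ⟨g', List.mem_cons_of_mem _ hg', h⟩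
    · rintro (h | ⟨g', hg', h⟩)
      · exact Or.inl (Or.inl h)
      · rcases List.mem_cons.mp hg' with he | he
        · exact Or.inl (Or.inr (he ▸ h))
        · exact Or.inr ⟨g', he, h⟩

theorem items_foldl_erase (q : List String → Bool) (ks : List (List String)) :
    ∀ (d : PySem.Dict (List String) Int),
    (ks.foldl (fun acc k => if q k then acc.erase k else acc) d).items =
      d.items.filter (fun kv => !(decide (kv.1 ∈ ks) && q kv.1)) := by
  induction ks with
  | nil => intro d; simp
  | cons a t ih =>
    intro d
    simp only [List.foldl_cons]
    by_cases hqa : q a = true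
    · rw [if_pos hqa, ih]
      show (d.items.filter fun p => !(p.1 == a)).filter _ = _
      rw [List.filter_filter]
      apply List.filter_congr
      intro kv _
      by_cases h1 : kv.1 = a <;> by_cases h2 : kv.1 ∈ t <;>
        simp [h1, h2, hqa]
    · rw [if_neg hqa, ih]
      apply List.filter_congr
      intro kv _
      by_cases h1 : kv.1 = a <;> by_cases h2 : kv.1 ∈ t <;>
        simp [h1, h2, hqa]

theorem popB_eq (cs : List (List String × Int)) (hnd : (cs.map Prod.fst).Nodup) :
    pop_subsequences_alt cs = cs.filter (fun kv => !dominatedB cs kv.1) := by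
  unfold pop_subsequences_alt
  set byCount : PySem.Dict Int (List (List String)) :=
    (PySem.Dict.mk cs).items.foldl
      (fun bc kv => bc.modify kv.2 [] (fun g => g ++ [kv.1])) PySem.Dict.empty
    with hbc
  have hitems0 : (PySem.Dict.mk cs).items = cs := rfl
  -- keys of the grouping dict
  have hkeys : byCount.keys = PySem.Set.ofList (cs.map (fun kv => kv.2)) := by
    rw [hbc, hitems0]
    have := PySem.Dict.keys_foldl_modify_key cs (fun kv => kv.2)
      ([] : List (List String)) (fun bc kv => fun g => g ++ [kv.1]) PySem.Dict.empty
    rw [this]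
    rfl
  have hnodupk : byCount.keys.Nodup := by
    rw [hkeys]; exact PySem.Set.nodup_ofList _
  -- each group
  have hgetD : ∀ c : Int, byCount.getD c []
      = (cs.filter (fun kv => kv.2 == c)).map Prod.fst := by
    intro c
    have hswap : (cs.map (fun kv : List String × Int => (kv.2, kv.1))).foldl
        (fun d p => d.modify p.1 [] fun gg => gg ++ [p.2])
        (PySem.Dict.empty : PySem.Dict Int (List (List String)))
        = cs.foldl (fun bc kv => bc.modify kv.2 [] fun gg => gg ++ [kv.1])
            PySem.Dict.empty := by
      rw [List.foldl_map]
    rw [hbc, hitems0, ← hswap]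
    rw [PySem.Dict.getD_foldl_modify_append]
    simp [List.filter_map, Function.comp_def]
  have hvalues : byCount.values
      = (PySem.Set.ofList (cs.map (fun kv => kv.2))).map
          (fun c => (cs.filter (fun kv => kv.2 == c)).map Prod.fst) := by
    show byCount.items.map Prod.snd = _
    rw [PySem.Dict.items_eq_map_keys byCount hnodupk []]
    rw [List.map_map, hkeys]
    apply List.map_congr_left
    intro c _
    exact hgetD c
  -- membership in doomed = domination
  have hdoomed : ∀ x, x ∈ cs.map Prod.fst →
      ((x ∈ byCount.values.foldl (fun dm group =>
          group.foldl (fun dm k =>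
            if group.any (fun big => decide (k.length < big.length) && containsSeq big k)
            then PySem.Set.add dm k else dm) dm) PySem.Set.empty) ↔
        dominatedB cs x = true) := by
    intro x hx
    rw [mem_doomed_loop]
    simp only [PySem.Set.empty]
    rw [hvalues]
    constructor
    · rintro (h | ⟨g, hg, hxg, hq⟩)
      · simp at h
      · obtain ⟨c, _hc, hgc⟩ := List.mem_map.mp hg
        subst hgc
        obtain ⟨big, hbig, hbigq⟩ := List.any_eq_true.mp hq
        obtain ⟨kvb, hkvb, hkvb1⟩ := List.mem_map.mp hbig
        obtain ⟨kvx, hkvx, hkvx1⟩ := List.mem_map.mp hxg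
        have hkvbm := List.mem_filter.mp hkvb
        have hkvxm := List.mem_filter.mp hkvx
        have hbc2 : kvb.2 = c := by simpa using hkvbm.2
        have hxc2 : kvx.2 = c := by simpa using hkvxm.2
        apply List.any_eq_true.mpr
        refine ⟨big, List.mem_map.mpr ⟨kvb, hkvbm.1, hkvb1⟩, ?_⟩
        simp only [Bool.and_eq_true, decide_eq_true_eq] at hbigq
        simp only [domPair, Bool.and_eq_true, decide_eq_true_eq, beq_iff_eq]
        refine ⟨⟨hbigq.1, ?_⟩, ?_⟩
        · rw [is_subset_iff_infix]
          rw [← containsSeq_iff_infix]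
          exact hbigq.2
        · have h1 : (PySem.Dict.mk cs).get? big = some kvb.2 := by
            apply PySem.Dict.get?_of_mem_items
            · rw [hitems0, ← hkvb1]; exact hkvbm.1
            · exact hnd
          have h2 : (PySem.Dict.mk cs).get? x = some kvx.2 := by
            apply PySem.Dict.get?_of_mem_items
            · rw [hitems0, ← hkvx1]; exact hkvxm.1
            · exact hnd
          rw [h1, h2, hbc2, hxc2]
    · intro hdom
      obtain ⟨b, hb, hbp⟩ := List.any_eq_true.mp hdom
      obtain ⟨kvb, hkvb, hkvb1⟩ := List.mem_map.mp hb
      obtain ⟨kvx, hkvx, hkvx1⟩ := List.mem_map.mp hx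
      have h1 : (PySem.Dict.mk cs).get? b = some kvb.2 := by
        apply PySem.Dict.get?_of_mem_items
        · rw [hitems0, ← hkvb1]; exact hkvb
        · exact hnd
      have h2 : (PySem.Dict.mk cs).get? x = some kvx.2 := by
        apply PySem.Dict.get?_of_mem_items
        · rw [hitems0, ← hkvx1]; exact hkvx
        · exact hnd
      simp only [domPair, Bool.and_eq_true, decide_eq_true_eq, beq_iff_eq] at hbp
      have hveq : kvb.2 = kvx.2 := by
        rw [h1, h2] at hbp
        exact Option.some.inj hbp.2
      refine Or.inr ⟨(cs.filter (fun kv => kv.2 == kvx.2)).map Prod.fst,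
        List.mem_map.mpr ⟨kvx.2, ?_, rfl⟩, ?_, ?_⟩
      · rw [PySem.Set.mem_ofList]
        exact List.mem_map.mpr ⟨kvx, hkvx, rfl⟩
      · exact List.mem_map.mpr ⟨kvx, List.mem_filter.mpr ⟨hkvx, by simp⟩, hkvx1⟩
      · apply List.any_eq_true.mpr
        refine ⟨b, List.mem_map.mpr ⟨kvb, List.mem_filter.mpr ⟨hkvb, by simp [hveq]⟩, hkvb1⟩, ?_⟩
        simp only [Bool.and_eq_true, decide_eq_true_eq]
        refine ⟨hbp.1.1, ?_⟩
        rw [containsSeq_iff_infix, ← is_subset_iff_infix]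
        exact hbp.1.2
  -- the final erase loop
  rw [items_foldl_erase]
  show ((PySem.Dict.mk cs).items).filter _ = _
  rw [hitems0]
  apply List.filter_congr
  intro kv hkv
  have hkvk : kv.1 ∈ cs.map Prod.fst := List.mem_map.mpr ⟨kv, hkv, rfl⟩
  have hmemk : kv.1 ∈ (PySem.Dict.mk cs).keys := hkvk
  have hdec : decide (kv.1 ∈ (PySem.Dict.mk cs).keys) = true := decide_eq_true hmemk
  have hcd : (byCount.values.foldl (fun dm group =>
      group.foldl (fun dm k =>
        if group.any (fun big => decide (k.length < big.length) && containsSeq big k)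
        then PySem.Set.add dm k else dm) dm) PySem.Set.empty).contains kv.1
      = dominatedB cs kv.1 := by
    by_cases hdom : dominatedB cs kv.1 = true
    · rw [hdom]
      exact (PySem.Set.contains_iff _ _).mpr ((hdoomed kv.1 hkvk).mpr hdom)
    · have hdom' : dominatedB cs kv.1 = false := by
        revert hdom; cases dominatedB cs kv.1 <;> simp
      rw [hdom']
      apply Bool.eq_false_iff.mpr
      intro hc
      have := (hdoomed kv.1 hkvk).mp ((PySem.Set.contains_iff _ _).mp hc)
      rw [hdom'] at this
      exact absurd this (by simp)
  show (!(decide (kv.1 ∈ (PySem.Dict.mk cs).keys) && _)) = _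
  rw [hdec, Bool.true_and, hcd]

-- ===== VERDICT (by name: the statement is the Claim_ definition above) =====
theorem pop_subsequences_spec : Claim_equal_pop_subsequences := by
  intro cs _hdom hpre
  unfold Spec_pop_subsequences
  rw [popA_eq cs hpre, popB_eq cs hpre]
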